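-- pv_equiv track=rewrite | github.com/shkitan/ANLP_project | anlp_proj/src/preprocessing/id_to_data.py | obj_process
-- ===== SOURCE A (Python) =====
-- def is_word_uppercase(word):
--     """
--     Checks if a word consists entirely of uppercase characters, excluding spaces.
--
--     Parameters:
--         word (str): The word to be checked.
--
--     Returns:
--         bool: True if the word consists only of uppercase characters, False otherwise.
--
--     Example:
--         word = "HELLO"
--         is_upper = is_word_uppercase(word)
--     """
--     for char in word:
--         if char == " ":
--             continue
--         if not char.isupper():
--             return False
--     return True
--
-- def obj_process(text):
--     """
--     Processes the input text and splits it into categories based on uppercase words followed by a colon.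
--
--     Parameters:
--         text (str): The input text to be processed.
--
--     Returns:
--         dict: A dictionary containing the categories as keys and the corresponding text as values.
--
--     Example:
--         text = "META_DATA: This is the meta data.\nDESCRIPTION: This is the description."
--         processed_text = obj_process(text)
--     """
--     lines = text.split('\n')
--     dict_cat_text = {}
--     text = lines[0]
--     cur_cat = 'meta_data'
--     for line in lines[1:]:
--         if ':' in line and is_word_uppercase(line.split(':')[0]):
--             dict_cat_text[cur_cat] = text
--             cur_cat = line.split(':')[0]
--             text = line.split(':')[1]
--         else:
--             text += '\n'
--             text += line
--             continue
--     dict_cat_text[cur_cat] = text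
--     return dict_cat_text
-- ===== SOURCE B (Python) =====
-- def obj_process(text):
--     """Split text into the same category dict as A, but by cutting the line
--     list into whole segments at header lines and joining each segment once,
--     instead of growing a string accumulator line by line."""
--     lines = text.split('\n')
--
--     def is_header(line):
--         if ':' not in line:
--             return False
--         prefix = line.split(':')[0]
--         return all(c == ' ' or c.isupper() for c in prefix)
--
--     def segments(cat, head, rest):
--         idx = next((i for i, l in enumerate(rest) if is_header(l)), len(rest))
--         out = [(cat, '\n'.join([head] + rest[:idx]))]
--         if idx < len(rest):
--             parts = rest[idx].split(':')
--             out += segments(parts[0], parts[1], rest[idx + 1:])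
--         return out
--
--     return dict(segments('meta_data', lines[0], lines[1:]))
-- ===== Notes on version B (the rewrite author's own statement) =====
-- stated objective: alternative
-- what changed: A threads one mutable (dict, current-category, growing-string) state through a single line loop; B instead recursively cuts the line list into whole segments at header lines (find first header index, slice), joins each segment's lines once, and builds the dict from the finished pair list.
import Mathlib
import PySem

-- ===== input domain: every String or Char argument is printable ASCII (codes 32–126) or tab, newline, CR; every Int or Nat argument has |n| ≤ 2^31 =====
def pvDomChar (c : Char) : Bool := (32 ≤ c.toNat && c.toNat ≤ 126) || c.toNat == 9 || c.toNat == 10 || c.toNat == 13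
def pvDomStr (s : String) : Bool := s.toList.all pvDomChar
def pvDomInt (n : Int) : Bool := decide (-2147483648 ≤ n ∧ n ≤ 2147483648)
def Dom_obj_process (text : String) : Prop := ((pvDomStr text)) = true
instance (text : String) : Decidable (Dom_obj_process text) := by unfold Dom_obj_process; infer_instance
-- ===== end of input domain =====

-- B replaces A's line-by-line string/dict accumulator with a two-level decomposition:
-- recursively cut the line list into whole segments at header lines, join each segment once,
-- and build the dict from the finished (category, text) pair list (objective: alternative).


-- shared primitive: s.split(sep) for a nonempty literal sep (":" / "\n"), where split? never returns none
def pySplit (s sep : String) : List String := (PySem.Str.split? s sep).getD []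

-- ===== PORT A =====

-- 'for char in word: …' with an early 'return False'
def pvUpperLoop : List Char → Bool
  | [] => true
  | c :: cs =>
    if c == ' ' then pvUpperLoop cs
    else if !(PySem.Chars.isupper c) then false
    else pvUpperLoop cs

def is_word_uppercase (word : String) : Bool := pvUpperLoop word.toList

-- the 'for line in lines[1:]' loop of A, state = (dict, cur_cat, text)
-- line.split(':')[0] / [1] : pyGet? is always 'some' where A reads it (index 1 only under the ':' in line guard)
def objLoopA : List String → PySem.Dict String String → String → String → PySem.Dict String String
  | [], d, cat, txt => d.insert cat txt
  | line :: rest, d, cat, txt =>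
    if PySem.Str.isIn ":" line
        && is_word_uppercase ((PySem.List.pyGet? (pySplit line ":") 0).getD "") then
      objLoopA rest (d.insert cat txt)
        ((PySem.List.pyGet? (pySplit line ":") 0).getD "")
        ((PySem.List.pyGet? (pySplit line ":") 1).getD "")
    else
      objLoopA rest d cat (txt ++ "\n" ++ line)

def obj_process (text : String) : List (String × String) :=
  let lines := pySplit text "\n"
  (objLoopA (PySem.List.slice lines (some 1) none) PySem.Dict.empty "meta_data"
    ((PySem.List.pyGet? lines 0).getD "")).items

-- ===== PORT B =====

def is_header (line : String) : Bool :=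
  if !(PySem.Str.isIn ":" line) then false
  else ((PySem.List.pyGet? (pySplit line ":") 0).getD "").toList.all
        (fun c => c == ' ' || PySem.Chars.isupper c)

-- B's segments(cat, head, rest): rest[:idx] / rest[idx:] with idx = first header index = takeWhile/dropWhile on 'not a header'
def segsB (cat head : String) (rest : List String) : List (String × String) :=
  let pre := rest.takeWhile (fun l => !is_header l)
  let post := rest.dropWhile (fun l => !is_header l)
  (cat, PySem.Str.join "\n" (head :: pre)) ::
    (if hp : post = [] then []
     else
       segsB ((PySem.List.pyGet? (pySplit post.headI ":") 0).getD "")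
             ((PySem.List.pyGet? (pySplit post.headI ":") 1).getD "") post.tail)
termination_by rest.length
decreasing_by
  show post.tail.length < rest.length
  have hle : post.length ≤ rest.length := List.length_dropWhile_le (fun l => !is_header l) rest
  cases hpost : post with
  | nil => exact absurd hpost hp
  | cons h t => rw [hpost] at hle; simp only [List.length_cons, List.tail_cons] at hle ⊢; omega

def obj_process_alt (text : String) : List (String × String) :=
  let lines := pySplit text "\n"
  ((segsB "meta_data" ((PySem.List.pyGet? lines 0).getD "")
      (PySem.List.slice lines (some 1) none)).foldl
    (fun d p => d.insert p.1 p.2) (PySem.Dict.empty : PySem.Dict String String)).items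

-- ===== PRECONDITION & SPEC =====
def Spec_obj_process (text : String) (out : List (String × String)) : Prop := out = obj_process_alt text
instance (text : String) (out : List (String × String)) : Decidable (Spec_obj_process text out) := by unfold Spec_obj_process; infer_instance

-- ===== CLAIM (what is proved, stated in full; the proofs are below) =====
def Claim_equal_obj_process : Prop := ∀ (text : String), Dom_obj_process text → Spec_obj_process text (obj_process text)

-- ===== LEMMAS AND PROOFS =====

theorem pvUpperLoop_eq_all (cs : List Char) :
    pvUpperLoop cs = cs.all (fun c => c == ' ' || PySem.Chars.isupper c) := by
  induction cs with
  | nil => rfl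
  | cons c cs ih =>
    simp only [pvUpperLoop, List.all_cons, ih]
    by_cases h1 : c == ' ' <;> by_cases h2 : PySem.Chars.isupper c <;> simp [h1, h2]

theorem header_eq (line : String) :
    (PySem.Str.isIn ":" line
      && is_word_uppercase ((PySem.List.pyGet? (pySplit line ":") 0).getD "")) = is_header line := by
  unfold is_header is_word_uppercase
  by_cases h : PySem.Str.isIn ":" line <;>
    simp [pvUpperLoop_eq_all]

theorem join_extend (a b : String) (t : List String) :
    PySem.Str.join "\n" ((a ++ "\n" ++ b) :: t) = PySem.Str.join "\n" (a :: b :: t) := by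
  apply String.toList_inj.mp
  rw [PySem.Str.toList_join, PySem.Str.toList_join]
  cases t with
  | nil =>
    simp [PySem.Chars.join_cons_cons, PySem.Chars.join_singleton, String.toList_append]
  | cons c t =>
    simp [PySem.Chars.join_cons_cons, String.toList_append]

theorem join_single (a : String) : PySem.Str.join "\n" [a] = a := by
  apply String.toList_inj.mp
  rw [PySem.Str.toList_join]
  simp [PySem.Chars.join_singleton]

theorem loopA_eq_segsB (rest : List String) :
    ∀ (cat txt : String) (d : PySem.Dict String String),
      objLoopA rest d cat txt
        = (segsB cat txt rest).foldl (fun d p => d.insert p.1 p.2) d := by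
  induction rest with
  | nil =>
    intro cat txt d
    rw [segsB.eq_def]
    simp [objLoopA, join_single]
  | cons line rest ih =>
    intro cat txt d
    rw [segsB.eq_def]
    simp only [objLoopA, header_eq]
    by_cases h : is_header line
    · simp only [h, if_true, List.takeWhile_cons, List.dropWhile_cons, Bool.not_true,
        Bool.false_eq_true, if_false, reduceCtorEq, List.headI, List.tail_cons, dite_false,
        reduceDIte, List.foldl_cons, join_single]
      rw [ih]
    · simp only [h, Bool.false_eq_true, if_false, List.takeWhile_cons, List.dropWhile_cons,
        Bool.not_false, if_true]
      rw [ih, segsB.eq_def]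
      simp only [List.foldl_cons, join_extend]

-- ===== VERDICT (by name: the statement is the Claim_ definition above) =====
theorem obj_process_spec : Claim_equal_obj_process := by
  intro text _
  unfold Spec_obj_process obj_process obj_process_alt
  simp only [loopA_eq_segsB]
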